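-- pv_equiv track=rewrite | github.com/Akansha143/Ava---AI-Chatbot | backend/utils/response_generator.py | _add_entity_context
-- ===== SOURCE A (Python) =====
-- def _add_entity_context(response, entities):
--     """Add context based on detected entities"""
--     if entities:
--         people = [e for e in entities if e["label"] in ["PERSON"]]
--         places = [e for e in entities if e["label"] in ["GPE", "LOC"]]
--
--         if people:
--             response += f" I notice you mentioned {people[0]['text']}."
--         elif places:
--             response += f" I see you're asking about {places[0]['text']}."
--
--     return response
-- ===== SOURCE B (Python) =====
-- def _add_entity_context(response, entities):
--     """Add context based on detected entities: rank every entity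
--     (PERSON -> 0, GPE/LOC -> 1, anything else -> 2), select the single
--     (rank, position)-minimal entity with min(), and phrase by its rank."""
--     if entities:
--         rank = {"PERSON": 0, "GPE": 1, "LOC": 1}
--         best_i, best_e = min(enumerate(entities),
--                              key=lambda ie: (rank.get(ie[1]["label"], 2), ie[0]))
--         r = rank.get(best_e["label"], 2)
--         if r == 0:
--             response += f" I notice you mentioned {best_e['text']}."
--         elif r == 1:
--             response += f" I see you're asking about {best_e['text']}."
--     return response
-- ===== Notes on version B (the rewrite author's own statement) =====
-- stated objective: alternative
-- what changed: Replaces A's two filtering list comprehensions and preference branching with a rank-and-argmin algorithm: every entity gets a numeric rank from a table (PERSON 0, GPE/LOC 1, other 2), one min() over (rank, position) selects the single relevant entity, and the sentence is chosen by the winner's rank.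
import Mathlib
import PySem

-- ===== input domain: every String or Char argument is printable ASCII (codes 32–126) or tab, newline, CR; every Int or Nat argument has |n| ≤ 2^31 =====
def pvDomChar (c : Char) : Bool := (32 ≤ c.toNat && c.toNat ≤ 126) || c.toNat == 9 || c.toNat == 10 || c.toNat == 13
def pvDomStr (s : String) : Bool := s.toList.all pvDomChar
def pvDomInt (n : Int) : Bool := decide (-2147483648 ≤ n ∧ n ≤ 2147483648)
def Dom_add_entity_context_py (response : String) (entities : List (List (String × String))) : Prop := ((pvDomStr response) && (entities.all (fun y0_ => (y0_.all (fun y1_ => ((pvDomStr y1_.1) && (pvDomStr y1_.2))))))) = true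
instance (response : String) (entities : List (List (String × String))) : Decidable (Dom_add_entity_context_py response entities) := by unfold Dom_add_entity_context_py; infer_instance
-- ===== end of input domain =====

-- B replaces A's two filtering comprehensions with a rank-and-argmin pass: every entity gets a rank (PERSON 0, GPE/LOC 1, other 2), one min over (rank, index) selects the entity, and the sentence is chosen by the winner's rank (objective: alternative, same cost).


-- shared helpers: e["label"] / e["text"] read as total functions (Pre_ guarantees the key is present where it is read)
def pvLabel (e : List (String × String)) : String :=
  ((PySem.Dict.mk e).get? "label").getD ""

def pvText (e : List (String × String)) : String :=
  ((PySem.Dict.mk e).get? "text").getD ""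

def pvIsPerson (e : List (String × String)) : Bool := pvLabel e == "PERSON"

def pvIsPlace (e : List (String × String)) : Bool :=
  pvLabel e == "GPE" || pvLabel e == "LOC"

-- ===== PORT A =====
def add_entity_context_py (response : String) (entities : List (List (String × String))) : String :=
  if entities = [] then response
  else
    let people := entities.filter pvIsPerson
    let places := entities.filter pvIsPlace
    if people ≠ [] then
      response ++ " I notice you mentioned " ++ pvText (people.headD []) ++ "."
    else if places ≠ [] then
      response ++ " I see you're asking about " ++ pvText (places.headD []) ++ "."
    else response

-- ===== PORT B =====
-- rank = {"PERSON": 0, "GPE": 1, "LOC": 1}; rank.get(e["label"], 2)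
def pvRankTable : PySem.Dict String Int := PySem.Dict.mk [("PERSON", 0), ("GPE", 1), ("LOC", 1)]

def pvRank (e : List (String × String)) : Int := (pvRankTable.get? (pvLabel e)).getD 2

def add_entity_context_py_alt (response : String) (entities : List (List (String × String))) : String :=
  if entities = [] then response
  else
    -- min(enumerate(entities), key=lambda ie: (rank.get(ie[1]["label"], 2), ie[0]))
    match PySem.List.min2? (PySem.List.enumerate entities)
        (fun ie => pvRank ie.2) (fun ie : Int × List (String × String) => ie.1) with
    | none => response  -- unreachable (entities ≠ []); totality guard only
    | some best =>
      let r := pvRank best.2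
      if r = 0 then response ++ " I notice you mentioned " ++ pvText best.2 ++ "."
      else if r = 1 then response ++ " I see you're asking about " ++ pvText best.2 ++ "."
      else response

-- ===== PRECONDITION & SPEC =====
-- Pre_ excludes exactly the inputs where the Python raises KeyError: an entity without
-- the key "label", or the first PERSON (else first GPE/LOC) entity lacking the key "text".
def pvTextOK (entities : List (List (String × String))) : Bool :=
  match (entities.filter pvIsPerson).head? with
  | some p => (PySem.Dict.mk p).contains "text"
  | none =>
    match (entities.filter pvIsPlace).head? with
    | some q => (PySem.Dict.mk q).contains "text"
    | none => true

def Pre_add_entity_context_py (_response : String) (entities : List (List (String × String))) : Prop :=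
  (∀ e ∈ entities, (PySem.Dict.mk e).contains "label" = true) ∧ pvTextOK entities = true

instance (response : String) (entities : List (List (String × String))) : Decidable (Pre_add_entity_context_py response entities) := by
  unfold Pre_add_entity_context_py; infer_instance

def pvWitness_add_entity_context_py : String × (List (List (String × String))) :=
  ("Hello", [[("label", "GPE"), ("text", "Paris")], [("label", "PERSON"), ("text", "Bob")]])

def Spec_add_entity_context_py (response : String) (entities : List (List (String × String))) (out : String) : Prop := out = add_entity_context_py_alt response entities
instance (response : String) (entities : List (List (String × String))) (out : String) : Decidable (Spec_add_entity_context_py response entities out) := by unfold Spec_add_entity_context_py; infer_instance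

-- ===== CLAIM (what is proved, stated in full; the proofs are below) =====
def Claim_equal_add_entity_context_py : Prop := ∀ (response : String) (entities : List (List (String × String))), Dom_add_entity_context_py response entities → Pre_add_entity_context_py response entities → Spec_add_entity_context_py response entities (add_entity_context_py response entities)

-- ===== LEMMAS AND PROOFS =====

-- the dict lookup rank.get(label, 2) as an if-chain on the two predicates
lemma pvRank_eq (e : List (String × String)) :
    pvRank e = if pvIsPerson e then 0 else if pvIsPlace e then 1 else 2 := by
  unfold pvRank pvRankTable pvIsPerson pvIsPlace
  by_cases h1 : pvLabel e = "PERSON"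
  · simp [h1, PySem.Dict.get?]
  · by_cases h2 : pvLabel e = "GPE"
    · simp [h2, PySem.Dict.get?]
    · by_cases h3 : pvLabel e = "LOC"
      · simp [h3, PySem.Dict.get?]
      · have e1 : ("PERSON" == pvLabel e) = false := beq_eq_false_iff_ne.mpr (Ne.symm h1)
        have e2 : ("GPE" == pvLabel e) = false := beq_eq_false_iff_ne.mpr (Ne.symm h2)
        have e3 : ("LOC" == pvLabel e) = false := beq_eq_false_iff_ne.mpr (Ne.symm h3)
        simp [PySem.Dict.get?, List.find?, e1, e2, e3, h1, h2, h3]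

-- the folding step of min2? with key (rank, index)
def pvStep (acc : Option (Int × List (String × String))) (x : Int × List (String × String)) :
    Option (Int × List (String × String)) :=
  match acc with
  | none => some x
  | some m =>
    if (decide (pvRank x.2 < pvRank m.2) ||
        !decide (pvRank m.2 < pvRank x.2) && decide (x.1 < m.1)) = true then some x else some m

lemma pvMin2_eq (l : List (Int × List (String × String))) :
    PySem.List.min2? l (fun ie => pvRank ie.2) (fun ie : Int × List (String × String) => ie.1)
      = l.foldl pvStep none := by
  unfold PySem.List.min2?
  congr 1
  funext acc x
  cases acc <;> rfl

-- the element the min loop keeps: the first person, else the first place, else the start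
def pvPick (cur : Int × List (String × String)) (l : List (Int × List (String × String))) :
    Int × List (String × String) :=
  if pvIsPerson cur.2 then cur
  else match l.find? (fun x => pvIsPerson x.2) with
  | some p => p
  | none =>
    if pvIsPlace cur.2 then cur
    else match l.find? (fun x => pvIsPlace x.2) with
    | some q => q
    | none => cur

lemma pvFold_spec (l : List (Int × List (String × String))) (cur : Int × List (String × String))
    (hlt : ∀ x ∈ l, cur.1 < x.1) (hpw : l.Pairwise (fun a b => a.1 < b.1)) :
    l.foldl pvStep (some cur) = some (pvPick cur l) := by
  induction l generalizing cur with
  | nil => simp [pvPick]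
  | cons x l ih =>
    have hx : cur.1 < x.1 := hlt x (List.mem_cons_self ..)
    rcases List.pairwise_cons.mp hpw with ⟨hxl, hpw'⟩
    have hstep : pvStep (some cur) x =
        if pvRank x.2 < pvRank cur.2 then some x else some cur := by
      unfold pvStep
      have hno : decide (x.1 < cur.1) = false := by simp; omega
      simp [hno]
    rw [List.foldl_cons, hstep]
    by_cases hr : pvRank x.2 < pvRank cur.2
    · rw [if_pos hr, ih x hxl hpw']
      cases hpx : pvIsPerson x.2 <;> cases hqx : pvIsPlace x.2 <;>
        cases hpc : pvIsPerson cur.2 <;> cases hqc : pvIsPlace cur.2 <;>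
        simp [pvRank_eq, hpx, hqx, hpc, hqc] at hr ⊢ <;>
        simp [pvPick, hpx, hqx, hpc, hqc]
    · have hcl : ∀ y ∈ l, cur.1 < y.1 := fun y hy => hlt y (List.mem_cons_of_mem x hy)
      rw [if_neg hr, ih cur hcl hpw']
      cases hpx : pvIsPerson x.2 <;> cases hqx : pvIsPlace x.2 <;>
        cases hpc : pvIsPerson cur.2 <;> cases hqc : pvIsPlace cur.2 <;>
        simp [pvRank_eq, hpx, hqx, hpc, hqc] at hr ⊢ <;>
        simp [pvPick, hpx, hqx, hpc, hqc]

lemma pvFind?_enumerate (p : List (String × String) → Bool)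
    (t : List (List (String × String))) (s : Int) :
    ((PySem.List.enumerate t s).find? (fun x => p x.2)).map Prod.snd = t.find? p := by
  induction t generalizing s with
  | nil => simp [PySem.List.enumerate]
  | cons e t ih =>
    rw [PySem.List.enumerate_cons]
    by_cases h : p e = true
    · simp [h]
    · simp only [List.find?_cons]
      have h' : p e = false := by simpa using h
      simp [h', ih]

lemma pvHead?_filter (p : List (String × String) → Bool) (t : List (List (String × String))) :
    (t.filter p).head? = t.find? p := by
  induction t with
  | nil => simp
  | cons e t ih =>
    by_cases h : p e = true
    · simp [h]
    · have h' : p e = false := by simpa using h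
      simp [h', ih]

-- ===== VERDICT (by name: the statement is the Claim_ definition above) =====
theorem add_entity_context_py_spec : Claim_equal_add_entity_context_py := by
  intro response entities _ _
  unfold Spec_add_entity_context_py add_entity_context_py add_entity_context_py_alt
  by_cases hE : entities = []
  · simp [hE]
  · obtain ⟨e, t, rfl⟩ := List.exists_cons_of_ne_nil hE
    have hpw := PySem.List.pairwise_lt_enumerate (xs := e :: t) (s := 0)
    rw [PySem.List.enumerate_cons] at hpw
    rcases List.pairwise_cons.mp hpw with ⟨h1, h2⟩
    have hm : PySem.List.min2? (PySem.List.enumerate (e :: t))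
        (fun ie => pvRank ie.2) (fun ie : Int × List (String × String) => ie.1)
          = some (pvPick ((0 : Int), e) (PySem.List.enumerate t 1)) := by
      rw [pvMin2_eq, PySem.List.enumerate_cons, List.foldl_cons]
      exact pvFold_spec _ _ h1 h2
    have hfp := pvFind?_enumerate pvIsPerson t 1
    have hfq := pvFind?_enumerate pvIsPlace t 1
    simp only [hE, if_false, hm]
    cases hP : List.filter pvIsPerson (e :: t) with
    | cons p ps =>
      -- there is a person; the picked entity is the first one and has rank 0
      have hfind : List.find? pvIsPerson (e :: t) = some p := by
        rw [← pvHead?_filter, hP]; rfl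
      by_cases hpe : pvIsPerson e = true
      · have hpe' : p = e := by
          rw [List.find?_cons_of_pos hpe] at hfind; exact (Option.some.inj hfind).symm
        simp [pvPick, hpe, hpe', pvRank_eq]
      · have hpe' : pvIsPerson e = false := by simpa using hpe
        have hft : List.find? pvIsPerson t = some p := by
          rw [List.find?_cons_of_neg (by simp [hpe']) ] at hfind; exact hfind
        rw [hft] at hfp
        cases hfe : List.find? (fun x => pvIsPerson x.2) (PySem.List.enumerate t 1) with
        | none => rw [hfe] at hfp; simp at hfp
        | some u =>
          rw [hfe] at hfp
          have hu2 : u.2 = p := by simpa using hfp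
          have hup : pvIsPerson p = true := by
            have := List.find?_some hfe; rw [hu2] at this; simpa using this
          simp [pvPick, hpe', hfe, pvRank_eq, hup, hu2]
    | nil =>
      have hnop : ∀ y ∈ e :: t, pvIsPerson y = false := by
        intro y hy
        have := List.filter_eq_nil_iff.mp hP y hy
        simpa using this
      have hpe' : pvIsPerson e = false := hnop e (List.mem_cons_self ..)
      have hft : List.find? pvIsPerson t = none := by
        rw [← pvHead?_filter]
        have : List.filter pvIsPerson t = [] := by
          simpa [List.filter_cons, hpe'] using hP
        simp [this]
      rw [hft] at hfp
      have hfen : List.find? (fun x => pvIsPerson x.2) (PySem.List.enumerate t 1) = none := by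
        cases hfe : List.find? (fun x => pvIsPerson x.2) (PySem.List.enumerate t 1) with
        | none => rfl
        | some u => rw [hfe] at hfp; simp at hfp
      cases hQ : List.filter pvIsPlace (e :: t) with
      | cons q qs =>
        have hfindq : List.find? pvIsPlace (e :: t) = some q := by
          rw [← pvHead?_filter, hQ]; rfl
        have hqq : pvIsPerson q = false := by
          have hqmem : q ∈ e :: t := List.mem_of_find?_eq_some hfindq
          exact hnop q hqmem
        by_cases hqe : pvIsPlace e = true
        · have hqe' : q = e := by
            rw [List.find?_cons_of_pos hqe] at hfindq; exact (Option.some.inj hfindq).symm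
          simp [pvPick, hpe', hfen, hqe, hqe', pvRank_eq]
        · have hqe' : pvIsPlace e = false := by simpa using hqe
          have hftq : List.find? pvIsPlace t = some q := by
            rw [List.find?_cons_of_neg (by simp [hqe']) ] at hfindq; exact hfindq
          rw [hftq] at hfq
          cases hfeq : List.find? (fun x => pvIsPlace x.2) (PySem.List.enumerate t 1) with
          | none => rw [hfeq] at hfq; simp at hfq
          | some u =>
            rw [hfeq] at hfq
            have hu2 : u.2 = q := by simpa using hfq
            have huq : pvIsPlace q = true := by
              have := List.find?_some hfeq; rw [hu2] at this; simpa using this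
            simp [pvPick, hpe', hqe', hfen, hfeq, pvRank_eq, hu2, hqq, huq]
      | nil =>
        have hqe' : pvIsPlace e = false := by
          have := List.filter_eq_nil_iff.mp hQ e (List.mem_cons_self ..)
          simpa using this
        have hftq : List.find? pvIsPlace t = none := by
          rw [← pvHead?_filter]
          have : List.filter pvIsPlace t = [] := by
            simpa [List.filter_cons, hqe'] using hQ
          simp [this]
        rw [hftq] at hfq
        have hfeqn : List.find? (fun x => pvIsPlace x.2) (PySem.List.enumerate t 1) = none := by
          cases hfe : List.find? (fun x => pvIsPlace x.2) (PySem.List.enumerate t 1) with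
          | none => rfl
          | some u => rw [hfe] at hfq; simp at hfq
        simp [pvPick, hpe', hqe', hfen, hfeqn, pvRank_eq]
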